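-- pv_equiv track=rewrite | github.com/jinyoungkim927/olib | obsidian_librarian/commands/notes.py | is_within_latex
-- ===== SOURCE A (Python) =====
-- def is_within_latex(content, match_start, match_end):
--     """Check if a match position is within LaTeX delimiters ($ or $$)"""
--     # Split the content by $ to find LaTeX blocks
--     chunks = content.split('$')
--
--     # If odd number of chunks, we have unclosed LaTeX
--     if len(chunks) % 2 == 0:
--         return False
--
--     # Track position in original string
--     pos = 0
--     in_latex = False
--
--     for i, chunk in enumerate(chunks):
--         next_pos = pos + len(chunk)
--
--         # If we're in a LaTeX section and our match overlaps with it
--         if in_latex and pos <= match_start < next_pos: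
--             return True
--
--         # Add $ length except for last chunk
--         if i < len(chunks) - 1:
--             next_pos += 1
--
--         # Toggle LaTeX state
--         in_latex = not in_latex
--         pos = next_pos
--
--     return False
-- ===== SOURCE B (Python) =====
-- def is_within_latex(content, match_start, match_end):
--     """Check if a match position is within LaTeX delimiters ($ or $$)"""
--     if content.count('$') % 2 == 1:
--         # odd number of $: unclosed LaTeX
--         return False
--     if match_start < 0 or match_start >= len(content):
--         return False
--     if content[match_start] == '$':
--         # sitting on a delimiter itself, not inside a block
--         return False
--     # inside a block iff an odd number of $ precede the position
--     return content[:match_start].count('$') % 2 == 1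
-- ===== Notes on version B (the rewrite author's own statement) =====
-- stated objective: simpler
-- what changed: A splits content on '$' and walks the chunk list tracking position and an in_latex toggle; B instead checks the total '$' count is even, bounds-checks the position, rejects a position sitting on a '$', and returns whether the number of '$' before the position is odd.
import Mathlib
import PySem

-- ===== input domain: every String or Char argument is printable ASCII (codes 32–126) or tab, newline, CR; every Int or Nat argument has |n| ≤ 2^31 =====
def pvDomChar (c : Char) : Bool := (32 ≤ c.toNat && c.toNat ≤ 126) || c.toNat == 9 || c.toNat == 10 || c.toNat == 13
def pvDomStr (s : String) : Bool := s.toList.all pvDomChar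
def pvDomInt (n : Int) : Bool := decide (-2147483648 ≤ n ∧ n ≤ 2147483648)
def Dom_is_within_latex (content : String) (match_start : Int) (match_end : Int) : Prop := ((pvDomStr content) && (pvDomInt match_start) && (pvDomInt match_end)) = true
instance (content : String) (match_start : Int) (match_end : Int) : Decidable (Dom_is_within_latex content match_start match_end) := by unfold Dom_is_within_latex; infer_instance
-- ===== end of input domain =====

-- B replaces A's split('$')-and-walk over chunks by a direct parity test: count '$' before the position (after the unclosed-block and bounds checks). Same return value everywhere; objective: simpler.


-- ===== PORT A =====
-- A's for-loop over the chunks of content.split('$'): state = (pos, in_latex); Python's 'i < len(chunks)-1' is 'rest ≠ []'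
def pvALoop : List (List Char) → Int → Bool → Int → Bool
  | [], _, _, _ => false
  | chunk :: rest, pos, inLatex, ms =>
    let nextPos : Int := pos + chunk.length
    if inLatex && decide (pos ≤ ms) && decide (ms < nextPos) then true
    else pvALoop rest (if rest.isEmpty then nextPos else nextPos + 1) (!inLatex) ms

def is_within_latex (content : String) (match_start : Int) (match_end : Int) : Bool :=
  let chunks := PySem.Chars.splitOn content.toList ['$']
  if chunks.length % 2 == 0 then false
  else pvALoop chunks 0 false match_start

-- ===== PORT B =====
def is_within_latex_alt (content : String) (match_start : Int) (match_end : Int) : Bool :=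
  let cs := content.toList
  if PySem.Chars.count cs ['$'] % 2 == 1 then false
  else if decide (match_start < 0) || decide ((cs.length : Int) ≤ match_start) then false
  else if PySem.Chars.pyGet? cs match_start == some '$' then false
  else decide (PySem.Chars.count (PySem.Chars.slice cs none (some match_start)) ['$'] % 2 = 1)

-- ===== PRECONDITION & SPEC =====
def Spec_is_within_latex (content : String) (match_start : Int) (match_end : Int) (out : Bool) : Prop := out = is_within_latex_alt content match_start match_end
instance (content : String) (match_start : Int) (match_end : Int) (out : Bool) : Decidable (Spec_is_within_latex content match_start match_end out) := by unfold Spec_is_within_latex; infer_instance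

-- ===== CLAIM (what is proved, stated in full; the proofs are below) =====
def Claim_equal_is_within_latex : Prop := ∀ (content : String) (match_start : Int) (match_end : Int), Dom_is_within_latex content match_start match_end → Spec_is_within_latex content match_start match_end (is_within_latex content match_start match_end)

-- ===== LEMMAS AND PROOFS =====

theorem pvCount_go_eq (fuel : Nat) (l : List Char) (acc : Nat) (h : l.length ≤ fuel) :
    PySem.Chars.count.go ['$'] fuel l acc = acc + l.count '$' := by
  induction fuel generalizing l acc with
  | zero =>
    have hnil : l = [] := by cases l <;> simp_all
    simp [hnil, PySem.Chars.count.go]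
  | succ n ih =>
    cases l with
    | nil => simp [PySem.Chars.count.go]
    | cons a t =>
      simp only [PySem.Chars.count.go, List.isPrefixOf]
      by_cases ha : a = '$'
      · subst ha
        simp only [List.length_cons] at h
        simp [ih t (acc + 1) (by omega)]
        omega
      · have hb : ('$' == a && true) = false := by simp; exact fun e => ha e.symm
        simp only [List.length_cons] at h
        simp [hb, ih t acc (by omega), ha]

theorem pvCount_single (l : List Char) : PySem.Chars.count l ['$'] = l.count '$' := by
  rw [PySem.Chars.count]
  simp only [List.isEmpty_cons, Bool.false_eq_true, if_false]
  simpa using pvCount_go_eq l.length l 0 le_rfl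

theorem pvSplit_go_eq (fuel : Nat) (l cur : List Char) (acc : List (List Char)) (h : l.length < fuel) :
    PySem.Chars.splitOn.go ['$'] fuel l cur acc
      = acc.reverse ++ (l.splitOn '$').modifyHead (cur.reverse ++ ·) := by
  induction fuel generalizing l cur acc with
  | zero => omega
  | succ n ih =>
    cases l with
    | nil => simp [PySem.Chars.splitOn.go, List.splitOn, List.splitOnP_nil]
    | cons a t =>
      simp only [PySem.Chars.splitOn.go, List.isPrefixOf, Bool.and_true, List.length_cons,
        List.drop_succ_cons, List.length_nil, List.drop_zero] at *
      by_cases ha : a = '$'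
      · subst ha
        rw [if_pos (by simp)]
        rw [ih t [] ((cur.reverse) :: acc) (by omega)]
        simp only [List.splitOn, List.splitOnP_cons, beq_self_eq_true, if_pos,
          List.reverse_cons, List.append_assoc, List.reverse_nil, List.nil_append,
          List.singleton_append, List.cons_append]
        rw [show (fun (x : List Char) => x) = id from rfl, List.modifyHead_id]
        simp [List.modifyHead]
      · rw [if_neg (by simp [Ne.symm ha])]
        rw [ih t (a :: cur) acc (by omega)]
        simp only [List.splitOn, List.splitOnP_cons, beq_iff_eq, ha, if_false,
          List.modifyHead_modifyHead, List.reverse_cons]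
        congr 1
        obtain ⟨b, bs, hbs⟩ := List.exists_cons_of_ne_nil (List.splitOnP_ne_nil (fun x => x == '$') t)
        rw [hbs]
        simp [List.modifyHead]

theorem pvSplit_eq (l : List Char) : PySem.Chars.splitOn l ['$'] = l.splitOn '$' := by
  rw [PySem.Chars.splitOn, pvSplit_go_eq _ _ _ _ (by omega)]
  obtain ⟨b, bs, hbs⟩ := List.exists_cons_of_ne_nil (List.splitOnP_ne_nil (fun x => x == '$') l)
  simp [List.splitOn] at hbs ⊢
  rw [hbs]
  simp [List.modifyHead]

theorem pvLength_splitOn (l : List Char) : (l.splitOn '$').length = l.count '$' + 1 := by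
  induction l with
  | nil => simp [List.splitOn, List.splitOnP_nil]
  | cons a t ih =>
    simp only [List.splitOn, List.splitOnP_cons, beq_iff_eq] at *
    by_cases ha : a = '$' <;> simp [ha, ih, List.count_cons]

theorem pvNotMem_splitOn (l : List Char) : ∀ p ∈ l.splitOn '$', '$' ∉ p := by
  induction l with
  | nil => simp [List.splitOn, List.splitOnP_nil]
  | cons a t ih =>
    simp only [List.splitOn, List.splitOnP_cons, beq_iff_eq] at *
    by_cases ha : a = '$'
    · simp only [ha, if_pos rfl]
      intro p hp
      rcases List.mem_cons.mp hp with h | h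
      · simp [h]
      · exact ih p h
    · simp only [ha, if_false]
      intro p hp
      obtain ⟨b, bs, hbs⟩ := List.exists_cons_of_ne_nil (List.splitOnP_ne_nil (fun x => x == '$') t)
      rw [hbs] at hp ih
      simp only [List.modifyHead] at hp
      rcases List.mem_cons.mp hp with h | h
      · subst h
        intro hm
        rcases List.mem_cons.mp hm with h | h
        · exact ha h.symm
        · exact ih b (List.mem_cons_self) h
      · exact ih p (List.mem_cons_of_mem b h)

theorem pvInterCons (c : List Char) (cs : List (List Char)) (h : cs ≠ []) :
    ['$'].intercalate (c :: cs) = c ++ '$' :: ['$'].intercalate cs := by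
  obtain ⟨d, tl, rfl⟩ := List.exists_cons_of_ne_nil h
  simp [List.intercalate, List.intersperse]

theorem pvALoop_shift (cs : List (List Char)) (pos : Int) (b : Bool) (ms : Int) :
    pvALoop cs pos b ms = pvALoop cs 0 b (ms - pos) := by
  induction cs generalizing pos b ms with
  | nil => rfl
  | cons c rest ih =>
    have h1 : decide (pos ≤ ms) = decide ((0:Int) ≤ ms - pos) := by
      rw [decide_eq_decide]; omega
    have h2 : decide (ms < pos + (c.length : Int)) = decide (ms - pos < 0 + (c.length : Int)) := by
      rw [decide_eq_decide]; omega
    simp only [pvALoop, h1, h2]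
    cases rest with
    | nil => rfl
    | cons d tl =>
      simp only [List.isEmpty_cons, Bool.false_eq_true, if_false]
      rw [ih (pos + c.length + 1), ih (0 + c.length + 1)]
      have : ms - (pos + ↑c.length + 1) = ms - pos - (0 + ↑c.length + 1) := by omega
      rw [this]


def pvBCore (l : List Char) (ms : Int) : Bool :=
  if ms < 0 ∨ (l.length : Int) ≤ ms then false
  else if l[ms.toNat]? = some '$' then false
  else decide ((l.take ms.toNat).count '$' % 2 = 1)

theorem pvBCore_neg (l : List Char) (x : Int) (hx : x < 0) : pvBCore l x = false := by
  unfold pvBCore; rw [if_pos (Or.inl hx)]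

theorem pvBCore_step (c0 c1 l' : List Char) (h0 : '$' ∉ c0) (h1 : '$' ∉ c1) (ms : Int) :
    pvBCore (c0 ++ '$' :: (c1 ++ '$' :: l')) ms
      = if decide ((c0.length:Int) < ms) && decide (ms < (c0.length:Int) + 1 + c1.length) then true
        else pvBCore l' (ms - ((c0.length:Int) + c1.length + 2)) := by
  by_cases hneg : ms < 0
  · rw [if_neg (by simp; omega), pvBCore_neg (c0 ++ '$' :: (c1 ++ '$' :: l')) _ hneg, pvBCore_neg l' _ (by omega)]
  · obtain ⟨m, rfl⟩ := Int.eq_ofNat_of_zero_le (by omega : (0:Int) ≤ ms)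
    set L := c0 ++ '$' :: (c1 ++ '$' :: l') with hL
    have hlen : L.length = c0.length + c1.length + 2 + l'.length := by simp [hL]; omega
    have htn : ((m : Int)).toNat = m := by omega
    have hnotlow : ∀ (hml : m < L.length), ¬((m:Int) < 0 ∨ (L.length : Int) ≤ (m:Int)) := by
      intro hml
      push_neg
      exact ⟨by omega, by push_cast; omega⟩
    rcases Nat.lt_or_ge m c0.length with hr | hr
    · -- m < |c0|
      rw [if_neg (by simp; omega), pvBCore_neg l' _ (by omega)]
      unfold pvBCore
      rw [if_neg (hnotlow (by omega)), htn]
      have hg : L[m]? = c0[m]? := by rw [hL]; exact List.getElem?_append_left hr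
      have hgv : L[m]? = some c0[m] := by rw [hg]; exact List.getElem?_eq_getElem hr
      have hget : ¬(L[m]? = some '$') := by
        rw [hgv]; intro h; exact h0 (by simpa using (Option.some.inj h) ▸ List.getElem_mem hr)
      rw [if_neg hget]
      have ht : L.take m = c0.take m := by
        rw [hL, List.take_append, Nat.sub_eq_zero_of_le (by omega)]
        simp
      have hz : (L.take m).count '$' = 0 := by
        rw [ht]; exact List.count_eq_zero.mpr (fun h => h0 (List.mem_of_mem_take h))
      simp [hz]
    · rcases Nat.lt_or_ge m (c0.length + 1 + c1.length) with hr2 | hr2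
      · rcases Nat.eq_or_lt_of_le hr with he | hlt
        · -- m = |c0| : the first '$'
          rw [if_neg (by simp; omega), pvBCore_neg l' _ (by omega)]
          unfold pvBCore
          rw [if_neg (hnotlow (by omega)), htn]
          have hg : L[m]? = some '$' := by
            rw [hL, List.getElem?_append_right (by omega), ← he, Nat.sub_self]
            rfl
          rw [if_pos hg]
        · -- |c0| < m < |c0|+1+|c1| : inside the c1 block
          rw [if_pos (by simp; omega)]
          unfold pvBCore
          rw [if_neg (hnotlow (by omega)), htn]
          have hk : m - c0.length - 1 < c1.length := by omega
          have hg : L[m]? = c1[m - c0.length - 1]? := by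
            rw [hL, List.getElem?_append_right (by omega)]
            have e1 : m - c0.length = (m - c0.length - 1) + 1 := by omega
            conv_lhs => rw [e1]
            rw [List.getElem?_cons_succ, List.getElem?_append_left hk]
          have hget : ¬(L[m]? = some '$') := by
            rw [hg, List.getElem?_eq_getElem hk]
            intro h; exact h1 (by simpa using (Option.some.inj h) ▸ List.getElem_mem hk)
          rw [if_neg hget]
          have ht : L.take m = c0 ++ '$' :: c1.take (m - c0.length - 1) := by
            rw [hL, List.take_append, List.take_of_length_le (show c0.length ≤ m by omega)]
            congr 1
            have e1 : m - c0.length = (m - c0.length - 1) + 1 := by omega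
            conv_lhs => rw [e1]
            rw [List.take_succ_cons]
            congr 1
            rw [List.take_append,
              Nat.sub_eq_zero_of_le (show m - c0.length - 1 ≤ c1.length by omega)]
            simp
          have hcnt : (L.take m).count '$' = 1 := by
            rw [ht, List.count_append, List.count_cons]
            have e0 : c0.count '$' = 0 := List.count_eq_zero.mpr h0
            have e1 : (c1.take (m - c0.length - 1)).count '$' = 0 :=
              List.count_eq_zero.mpr (fun h => h1 (List.mem_of_mem_take h))
            simp [e0, e1]
          simp [hcnt]
      · -- m ≥ |c0|+1+|c1|
        rw [if_neg (by simp; omega)]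
        rcases Nat.eq_or_lt_of_le hr2 with he | hlt
        · -- m = |c0|+|c1|+1 : the second '$'
          rw [pvBCore_neg l' _ (by omega)]
          unfold pvBCore
          rw [if_neg (hnotlow (by omega)), htn]
          have hg : L[m]? = some '$' := by
            rw [hL, List.getElem?_append_right (by omega)]
            have e1 : m - c0.length = c1.length + 1 := by omega
            rw [e1, List.getElem?_cons_succ, List.getElem?_append_right (by omega), Nat.sub_self]
            rfl
          rw [if_pos hg]
        · -- m ≥ |c0|+|c1|+2 : defer to l'
          have hoff : ((m:Int) - ((c0.length:Int) + c1.length + 2)) = ((m - (c0.length + c1.length + 2) : Nat) : Int) := by omega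
          set k := m - (c0.length + c1.length + 2) with hk
          rw [hoff]
          by_cases hoob : (L.length : Int) ≤ (m : Int)
          · unfold pvBCore
            rw [if_pos (Or.inr hoob),
                if_pos (by right; rw [hlen] at hoob; push_cast at hoob ⊢; omega)]
          · unfold pvBCore
            rw [if_neg (hnotlow (by rw [hlen] at hoob ⊢; push_cast at hoob; omega)),
                if_neg (show ¬(((k:Nat):Int) < 0 ∨ (l'.length:Int) ≤ ((k:Nat):Int)) from by
                  push_neg; rw [hlen] at hoob; push_cast at hoob ⊢; omega)]
            simp only [Int.toNat_natCast]
            have hg : L[m]? = l'[k]? := by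
              rw [hL, List.getElem?_append_right (by omega)]
              have e1 : m - c0.length = (m - c0.length - 1) + 1 := by omega
              rw [e1, List.getElem?_cons_succ, List.getElem?_append_right (by omega)]
              have e2 : m - c0.length - 1 - c1.length = k + 1 := by omega
              rw [e2, List.getElem?_cons_succ]
            rw [hg]
            by_cases hd : l'[k]? = some '$'
            · rw [if_pos hd, if_pos hd]
            · rw [if_neg hd, if_neg hd]
              have ht : L.take m = c0 ++ '$' :: (c1 ++ '$' :: l'.take k) := by
                rw [hL, List.take_append, List.take_of_length_le (show c0.length ≤ m by omega)]
                congr 1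
                have e1 : m - c0.length = (m - c0.length - 1) + 1 := by omega
                rw [e1, List.take_succ_cons]
                congr 1
                rw [List.take_append, List.take_of_length_le (show c1.length ≤ m - c0.length - 1 by omega)]
                congr 1
                have e2 : m - c0.length - 1 - c1.length = k + 1 := by omega
                rw [e2, List.take_succ_cons]
              have hcnt : (L.take m).count '$' = 2 + (l'.take k).count '$' := by
                rw [ht, List.count_append, List.count_cons, List.count_append, List.count_cons]
                have e0 : c0.count '$' = 0 := List.count_eq_zero.mpr h0
                have e1 : c1.count '$' = 0 := List.count_eq_zero.mpr h1
                simp [e0, e1]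
                omega
              rw [decide_eq_decide, hcnt]
              omega


theorem pvBCore_no_dollar (cl : List Char) (hc : '$' ∉ cl) (ms : Int) : pvBCore cl ms = false := by
  unfold pvBCore
  by_cases h1 : ms < 0 ∨ (cl.length : Int) ≤ ms
  · simp [h1]
  · simp only [h1, if_false]
    by_cases h2 : cl[ms.toNat]? = some '$'
    · simp [h2]
    · simp only [h2, if_false]
      have hz : (cl.take ms.toNat).count '$' = 0 :=
        List.count_eq_zero.mpr (fun h => hc (List.mem_of_mem_take h))
      simp [hz]

theorem pvCore (n : Nat) : ∀ (cs : List (List Char)), cs.length = n → cs.length % 2 = 1 →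
    (∀ p ∈ cs, '$' ∉ p) → ∀ ms : Int,
    pvALoop cs 0 false ms = pvBCore (['$'].intercalate cs) ms := by
  induction n using Nat.strong_induction_on with
  | _ n ih =>
    intro cs hlen hodd hnm ms
    match cs with
    | [] => simp at hodd
    | [c0] =>
      have h0 : '$' ∉ c0 := hnm c0 (by simp)
      have hi : ['$'].intercalate [c0] = c0 := by simp [List.intercalate, List.intersperse]
      rw [hi, pvBCore_no_dollar c0 h0]
      rfl
    | c0 :: c1 :: cs' =>
      have hmem0 : '$' ∉ c0 := hnm c0 (by simp)
      have hmem1 : '$' ∉ c1 := hnm c1 (by simp)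
      have hodd' : cs'.length % 2 = 1 := by simp at hodd; omega
      have hne' : cs' ≠ [] := by intro h; rw [h] at hodd'; simp at hodd'
      set l' := ['$'].intercalate cs' with hl'
      have hl : ['$'].intercalate (c0 :: c1 :: cs') = c0 ++ '$' :: (c1 ++ '$' :: l') := by
        rw [pvInterCons _ _ (by simp), pvInterCons _ _ hne']
      have hrec := ih cs'.length (by simp at hlen; omega) cs' rfl hodd'
        (fun p hp => hnm p (by simp [hp])) (ms - ((c0.length : Int) + c1.length + 2))
      have hstep : pvALoop (c0 :: c1 :: cs') 0 false ms
          = if decide ((c0.length : Int) < ms) && decide (ms < (c0.length : Int) + 1 + c1.length)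
            then true
            else pvALoop cs' 0 false (ms - ((c0.length : Int) + c1.length + 2)) := by
        simp only [pvALoop, Bool.false_and, Bool.false_eq_true, if_false, List.isEmpty_cons,
          Bool.not_false, Bool.true_and]
        have hne'' : cs'.isEmpty = false := by
          cases cs' with | nil => exact absurd rfl hne' | cons _ _ => rfl
        rw [hne'']
        have e1 : decide ((0:Int) + c0.length + 1 ≤ ms) = decide ((c0.length : Int) < ms) := by
          rw [decide_eq_decide]; omega
        have e2 : decide (ms < (0:Int) + c0.length + 1 + c1.length)
            = decide (ms < (c0.length : Int) + 1 + c1.length) := by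
          rw [decide_eq_decide]; omega
        by_cases hc : (decide ((c0.length : Int) < ms) && decide (ms < (c0.length : Int) + 1 + c1.length)) = true
        · simp [e1, e2, hc]
        · simp only [e1, e2]
          simp only [Bool.not_eq_true] at hc
          rw [hc]
          simp only [Bool.false_eq_true, if_false]
          rw [pvALoop_shift]
          congr 1
          omega
      rw [hstep, hl, pvBCore_step _ _ _ hmem0 hmem1, hrec]

-- ===== VERDICT (by name: the statement is the Claim_ definition above) =====
theorem is_within_latex_spec : Claim_equal_is_within_latex := by
  intro content ms me _
  unfold Spec_is_within_latex is_within_latex is_within_latex_alt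
  simp only []
  rw [pvSplit_eq, pvCount_single]
  set l := content.toList with hlst
  by_cases hpar : l.count '$' % 2 = 1
  · have h1 : ((l.splitOn '$').length % 2 == 0) = true := by
      rw [pvLength_splitOn]; simp; omega
    have h2 : (l.count '$' % 2 == 1) = true := by simp [hpar]
    rw [h1, h2]
    simp
  · have h1 : ((l.splitOn '$').length % 2 == 0) = false := by
      rw [pvLength_splitOn]; simp; omega
    have h2 : (l.count '$' % 2 == 1) = false := by simp [hpar]
    rw [h1, h2]
    simp only [Bool.false_eq_true, if_false]
    rw [pvCore (l.splitOn '$').length (l.splitOn '$') rfl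
          (by rw [pvLength_splitOn]; omega) (pvNotMem_splitOn l) ms,
        List.intercalate_splitOn l '$']
    unfold pvBCore
    by_cases hoob : ms < 0 ∨ (l.length : Int) ≤ ms
    · rw [if_pos hoob, if_pos (by rcases hoob with h | h <;> simp [h])]
    · rw [if_neg hoob,
          if_neg (show ¬((decide (ms < 0) || decide ((l.length : Int) ≤ ms)) = true) by
            simp; push_neg at hoob; exact ⟨by omega, by omega⟩)]
      have hget : PySem.Chars.pyGet? l ms = l[ms.toNat]? := by
        rw [PySem.Chars.pyGet?_eq_listPyGet?]
        exact PySem.List.pyGet?_of_nonneg _ (by omega)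
      have hslice : PySem.Chars.slice l none (some ms) = l.take ms.toNat := by
        rw [PySem.Chars.slice_eq_listSlice, PySem.List.slice_to _ (by omega)]
      rw [hget, hslice, pvCount_single]
      by_cases hd : l[ms.toNat]? = some '$'
      · rw [if_pos hd, if_pos (by simp [hd])]
      · rw [if_neg hd, if_neg (by simp [hd])]
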